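-- pv_equiv track=rewrite | github.com/hampuskraft/wumpus-api | wumpus/sanitizer.py | replace_consecutive_upper
-- ===== SOURCE A (Python) =====
-- def replace_consecutive_upper(name: str, max_consecutive_upper: int) -> str:
--     """
--     Convert name to lowercase if the number of uppercase characters >= `max_consecutive_upper`.
--     """
--
--     consecutive = 0
--     new_name = ""
--
--     for char in name:
--         if char.isupper():
--             consecutive += 1
--         else:
--             consecutive = 0
--
--         if consecutive >= max_consecutive_upper:
--             new_name = name.lower()
--             break
--         else:
--             new_name += char
--
--     return new_name
-- ===== SOURCE B (Python) =====
-- from itertools import groupby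
--
--
-- def replace_consecutive_upper(name: str, max_consecutive_upper: int) -> str:
--     """Lowercase the whole name iff its longest consecutive uppercase run
--     reaches max_consecutive_upper."""
--     longest = max(
--         (sum(1 for _ in group) for is_upper, group in groupby(name, key=str.isupper) if is_upper),
--         default=0,
--     )
--     return name.lower() if longest >= max_consecutive_upper else name
-- ===== Notes on version B (the rewrite author's own statement) =====
-- stated objective: idiomatic
-- what changed: A's per-character accumulate-and-break scan with incremental string building is replaced by a groupby-style run decomposition: compute the longest consecutive uppercase run once, then decide with a single comparison whether to return name.lower() or name unchanged.
import Mathlib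
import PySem

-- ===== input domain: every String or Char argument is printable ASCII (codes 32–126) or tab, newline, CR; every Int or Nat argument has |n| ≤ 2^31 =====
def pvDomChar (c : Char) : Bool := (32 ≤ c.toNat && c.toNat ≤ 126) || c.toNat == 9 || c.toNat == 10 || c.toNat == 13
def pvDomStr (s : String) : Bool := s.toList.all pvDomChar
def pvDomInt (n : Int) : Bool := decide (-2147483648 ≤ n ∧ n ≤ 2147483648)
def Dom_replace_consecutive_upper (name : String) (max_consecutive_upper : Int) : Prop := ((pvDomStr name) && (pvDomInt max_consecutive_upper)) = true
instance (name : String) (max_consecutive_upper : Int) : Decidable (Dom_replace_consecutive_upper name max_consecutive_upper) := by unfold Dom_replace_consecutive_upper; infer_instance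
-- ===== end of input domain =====

-- B replaces A's accumulate-and-break character scan by a groupby-style run decomposition:
-- compute the longest consecutive-uppercase run, then decide once (objective: idiomatic).

-- ===== PORT A =====
-- A's for-loop with `break`: state = (consecutive, new_name); on break the result is name.lower().
def pvLoopA (lowerName : List Char) (t : Int) : List Char → Int → List Char → List Char
  | [], _, new_name => new_name
  | c :: rest, consecutive, new_name =>
    let consecutive' := if PySem.Chars.isupper c then consecutive + 1 else 0
    if t ≤ consecutive' then lowerName
    else pvLoopA lowerName t rest consecutive' (new_name ++ [c])

def replace_consecutive_upper (name : String) (max_consecutive_upper : Int) : String :=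
  String.ofList (pvLoopA (PySem.Str.lower name).toList max_consecutive_upper name.toList 0 [])

-- ===== PORT B =====
-- itertools.groupby(name, key=str.isupper): the list of (key, group length) runs, left to right.
def pvGroups : List Char → List (Bool × Nat)
  | [] => []
  | c :: cs =>
    let b := PySem.Chars.isupper c
    let run := cs.takeWhile (fun d => PySem.Chars.isupper d == b)
    (b, run.length + 1) :: pvGroups (cs.drop run.length)
termination_by cs => cs.length
decreasing_by
  simp only [List.length_drop, List.length_cons]; omega

-- max(…, default=0) over the uppercase groups' lengths.
def pvLongest (gs : List (Bool × Nat)) : Nat :=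
  gs.foldr (fun g m => if g.1 then max g.2 m else m) 0

def replace_consecutive_upper_alt (name : String) (max_consecutive_upper : Int) : String :=
  let longest := pvLongest (pvGroups name.toList)
  if max_consecutive_upper ≤ (longest : Int) then PySem.Str.lower name else name

-- ===== PRECONDITION & SPEC =====
def Spec_replace_consecutive_upper (name : String) (max_consecutive_upper : Int) (out : String) : Prop := out = replace_consecutive_upper_alt name max_consecutive_upper
instance (name : String) (max_consecutive_upper : Int) (out : String) : Decidable (Spec_replace_consecutive_upper name max_consecutive_upper out) := by unfold Spec_replace_consecutive_upper; infer_instance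

-- ===== CLAIM (what is proved, stated in full; the proofs are below) =====
def Claim_equal_replace_consecutive_upper : Prop := ∀ (name : String) (max_consecutive_upper : Int), Dom_replace_consecutive_upper name max_consecutive_upper → Spec_replace_consecutive_upper name max_consecutive_upper (replace_consecutive_upper name max_consecutive_upper)

-- ===== LEMMAS AND PROOFS =====

-- Whether A's loop ever breaks (reaches consecutive' ≥ t), same recursion as pvLoopA.
def pvReach (t : Int) : List Char → Int → Bool
  | [], _ => false
  | c :: cs, consecutive =>
    let consecutive' := if PySem.Chars.isupper c then consecutive + 1 else 0
    if t ≤ consecutive' then true else pvReach t cs consecutive'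

theorem pvLoopA_eq (low : List Char) (t : Int) :
    ∀ (cs : List Char) (consec : Int) (acc : List Char),
      pvLoopA low t cs consec acc =
        if pvReach t cs consec then low else acc ++ cs := by
  intro cs
  induction cs with
  | nil => intro consec acc; simp [pvLoopA, pvReach]
  | cons c rest ih =>
    intro consec acc
    by_cases hb : t ≤ (if PySem.Chars.isupper c then consec + 1 else (0 : Int))
    · simp [pvLoopA, pvReach, hb]
    · simp only [pvLoopA, pvReach, if_neg hb]
      rw [ih]
      split <;> simp

theorem pvGroups_cons (c : Char) (cs : List Char) :
    pvGroups (c :: cs) =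
      (PySem.Chars.isupper c,
        (cs.takeWhile (fun d => PySem.Chars.isupper d == PySem.Chars.isupper c)).length + 1)
        :: pvGroups
            (cs.drop (cs.takeWhile (fun d => PySem.Chars.isupper d == PySem.Chars.isupper c)).length) := by
  simp only [pvGroups]

theorem pvLongest_cons (g : Bool × Nat) (gs : List (Bool × Nat)) :
    pvLongest (g :: gs) = if g.1 then max g.2 (pvLongest gs) else pvLongest gs := rfl

-- Unfolding pvGroups once when the head is uppercase: the first group is the leading upper run.
theorem pvLongest_upper_head (cs : List Char) :
    pvLongest (pvGroups cs) =
      max (cs.takeWhile PySem.Chars.isupper).length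
        (pvLongest (pvGroups (cs.drop (cs.takeWhile PySem.Chars.isupper).length))) := by
  cases cs with
  | nil => simp [pvGroups, pvLongest]
  | cons c cs' =>
    by_cases hu : PySem.Chars.isupper c
    · have hbeq : (fun d => PySem.Chars.isupper d == PySem.Chars.isupper c)
          = PySem.Chars.isupper := by
        funext d; rw [hu]; cases PySem.Chars.isupper d <;> simp
      rw [pvGroups_cons, hbeq, pvLongest_cons]
      simp [hu]
    · simp [pvGroups_cons, pvLongest_cons,
        show PySem.Chars.isupper c = false from by simpa using hu]

-- Dropping a leading non-uppercase run does not change the longest uppercase run.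
theorem pvLongest_drop_lower (cs : List Char) :
    pvLongest (pvGroups (cs.drop (cs.takeWhile (fun d => !PySem.Chars.isupper d)).length)) =
      pvLongest (pvGroups cs) := by
  cases cs with
  | nil => simp
  | cons c cs' =>
    by_cases hu : PySem.Chars.isupper c
    · simp [hu]
    · have hf : PySem.Chars.isupper c = false := by simpa using hu
      have hbeq : (fun d => PySem.Chars.isupper d == PySem.Chars.isupper c)
          = (fun d => !PySem.Chars.isupper d) := by
        funext d; rw [hf]; cases PySem.Chars.isupper d <;> simp
      have hlen : ((c :: cs').takeWhile (fun d => !PySem.Chars.isupper d)).length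
          = (cs'.takeWhile (fun d => !PySem.Chars.isupper d)).length + 1 := by
        simp [hf]
      rw [hlen, List.drop_succ_cons, pvGroups_cons, hbeq, pvLongest_cons]
      rw [if_neg (by simp [hf])]

-- The main characterisation of A's loop condition by B's run structure.
theorem pvReach_char (t : Int) :
    ∀ (cs : List Char) (consec : Int), 0 ≤ consec →
      (pvReach t cs consec = true ↔
        cs ≠ [] ∧
          ((0 < (cs.takeWhile PySem.Chars.isupper).length ∧
              t ≤ consec + (cs.takeWhile PySem.Chars.isupper).length) ∨
            t ≤ (pvLongest (pvGroups cs) : Int))) := by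
  intro cs
  induction cs with
  | nil => intro consec _; simp [pvReach]
  | cons c cs' ih =>
    intro consec hconsec
    by_cases hu : PySem.Chars.isupper c
    · -- head uppercase: consecutive increments
      have hbeq : (fun d => PySem.Chars.isupper d == PySem.Chars.isupper c)
          = PySem.Chars.isupper := by
        funext d; rw [hu]; cases PySem.Chars.isupper d <;> simp
      have hgroups : pvLongest (pvGroups (c :: cs')) =
          max ((cs'.takeWhile PySem.Chars.isupper).length + 1)
            (pvLongest (pvGroups (cs'.drop (cs'.takeWhile PySem.Chars.isupper).length))) := by
        rw [pvGroups_cons, hbeq, pvLongest_cons]; simp [hu]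
      have hrec := pvLongest_upper_head cs'
      have hstep : pvReach t (c :: cs') consec
          = if t ≤ consec + 1 then true else pvReach t cs' (consec + 1) := by
        simp [pvReach, hu]
      rw [hstep, hgroups]
      simp only [List.takeWhile_cons, hu, if_pos, List.length_cons, ne_eq, reduceCtorEq,
        not_false_iff, true_and]
      by_cases hnil : cs' = []
      · subst hnil
        simp [pvReach, pvGroups, pvLongest]
        omega
      · rw [show (if t ≤ consec + 1 then true else pvReach t cs' (consec + 1))
            = true ↔ (t ≤ consec + 1 ∨ pvReach t cs' (consec + 1) = true) from by
          split <;> simp_all]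
        rw [ih (consec + 1) (by omega), hrec]
        simp only [hnil, ne_eq, not_false_iff, true_and]
        push_cast
        omega
    · -- head not uppercase: consecutive resets to 0
      have hf : PySem.Chars.isupper c = false := by simpa using hu
      have hbeq : (fun d => PySem.Chars.isupper d == PySem.Chars.isupper c)
          = (fun d => !PySem.Chars.isupper d) := by
        funext d; rw [hf]; cases PySem.Chars.isupper d <;> simp
      have hgroups : pvLongest (pvGroups (c :: cs')) = pvLongest (pvGroups cs') := by
        rw [pvGroups_cons, hbeq, pvLongest_cons]
        rw [if_neg (by simp [hf])]
        exact pvLongest_drop_lower cs'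
      have hrec := pvLongest_upper_head cs'
      have hstep : pvReach t (c :: cs') consec
          = if t ≤ (0 : Int) then true else pvReach t cs' 0 := by
        simp [pvReach, hf]
      rw [hstep, hgroups]
      simp only [List.takeWhile_cons, hf, Bool.false_eq_true, if_neg, List.length_nil,
        lt_irrefl, false_and, false_or, ne_eq, reduceCtorEq, not_false_iff, true_and]
      by_cases hnil : cs' = []
      · subst hnil
        simp [pvReach, pvGroups, pvLongest]
      · rw [show (if t ≤ (0 : Int) then true else pvReach t cs' 0)
            = true ↔ (t ≤ 0 ∨ pvReach t cs' 0 = true) from by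
          split <;> simp_all]
        rw [ih 0 le_rfl, hrec]
        simp only [hnil, ne_eq, not_false_iff, true_and]
        push_cast
        omega

theorem toList_empty_eq (s : String) (h : s.toList = []) : s = "" := by
  have := congrArg String.ofList h; simpa using this

-- ===== VERDICT (by name: the statement is the Claim_ definition above) =====
theorem replace_consecutive_upper_spec : Claim_equal_replace_consecutive_upper := by
  intro name t _
  unfold Spec_replace_consecutive_upper
  simp only [replace_consecutive_upper, replace_consecutive_upper_alt]
  rw [pvLoopA_eq]
  have hchar := pvReach_char t name.toList 0 le_rfl
  have hrec := pvLongest_upper_head name.toList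
  by_cases hnil : name.toList = []
  · have hname := toList_empty_eq name hnil
    subst hname
    have hlower : PySem.Str.lower "" = "" := by decide
    have h0 : ("" : String).toList = [] := by decide
    simp [h0, pvReach, pvGroups, pvLongest, hlower]
  · by_cases hr : pvReach t name.toList 0 = true
    · rw [if_pos hr]
      have hle : t ≤ (pvLongest (pvGroups name.toList) : Int) := by
        rcases (hchar.mp hr).2 with ⟨hL, h2⟩ | h3
        · rw [hrec]; push_cast; omega
        · exact h3
      rw [if_pos hle]
      simp [-PySem.Str.toList_lower]
    · rw [Bool.not_eq_true] at hr
      rw [hr]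
      have hgt : ¬ t ≤ (pvLongest (pvGroups name.toList) : Int) := fun h =>
        absurd (hchar.mpr ⟨hnil, Or.inr h⟩) (by simp [hr])
      rw [if_neg hgt]
      simp
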